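-- pv_equiv track=rewrite | github.com/KMYeaserArafat/Problem_Solving | HackerRank/FlatLandSpace.py | flatLandSpace
-- ===== SOURCE A (Python) =====
-- def flatLandSpace(n,m,c):
--     result = []
--     result0 = []
--     result1 = []
--     minvalue = min(c)
--     maxvalue = max(c)
--
--     for x in range(minvalue,maxvalue+1):
--         result.append(x)
--
--
--     for a in range(len(c)):
--         for x in range(len(result)):
--             Data = abs(result[x]-c[a])
--             result0.append(Data)
--
--     finalresult = []
--
--     for b in range(len(result0)):
--         if result0[b]<=m:
--             finalresult.append(result0[b])
--
--     maxData = max(finalresult)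
--
--     return maxData
-- ===== SOURCE B (Python) =====
-- def flatLandSpace(n, m, c):
--     # Every distance in 0..(max(c)-min(c)) is achieved (x ranges over [min,max]),
--     # so the largest one that is <= m is simply min(m, max(c)-min(c)).
--     return min(m, max(c) - min(c))
-- ===== Notes on version B (the rewrite author's own statement) =====
-- stated objective: faster
-- what changed: Replaces the enumeration of all |x-c[a]| distances over the whole [min(c),max(c)] range with the closed form min(m, max(c)-min(c)), since the achievable distances are exactly 0..(max(c)-min(c)).
import Mathlib
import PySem

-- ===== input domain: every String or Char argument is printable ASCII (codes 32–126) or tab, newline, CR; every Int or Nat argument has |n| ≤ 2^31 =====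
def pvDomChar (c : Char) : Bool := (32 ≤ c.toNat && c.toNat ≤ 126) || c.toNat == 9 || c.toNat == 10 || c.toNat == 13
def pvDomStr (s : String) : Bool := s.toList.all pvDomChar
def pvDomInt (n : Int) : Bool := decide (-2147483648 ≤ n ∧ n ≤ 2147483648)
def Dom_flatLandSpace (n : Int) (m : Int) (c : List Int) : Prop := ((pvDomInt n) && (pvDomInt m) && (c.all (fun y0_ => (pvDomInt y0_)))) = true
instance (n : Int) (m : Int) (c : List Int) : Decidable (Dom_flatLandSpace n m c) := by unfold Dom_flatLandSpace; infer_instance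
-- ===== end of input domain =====

-- B replaces A's enumeration of every distance over the whole [min(c), max(c)] range
-- with the closed form min(m, max(c) - min(c)); measured faster (asymptotic change).

-- ===== PORT A =====
def flatLandSpace (n : Int) (m : Int) (c : List Int) : Int :=
  match PySem.List.min? c (fun y => y), PySem.List.max? c (fun y => y) with
  | some minvalue, some maxvalue =>
    -- result = list(range(minvalue, maxvalue+1)), built by appending
    let result : List Int :=
      (PySem.List.pyRange minvalue (maxvalue + 1)).foldl (fun acc x => acc ++ [x]) []
    -- result0: for a in range(len(c)): for x in range(len(result)): append |result[x]-c[a]|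
    let result0 : List Int :=
      (PySem.List.pyRange 0 (c.length : Int)).foldl (fun acc0 a =>
        (PySem.List.pyRange 0 (result.length : Int)).foldl (fun acc1 x =>
          acc1 ++ [|PySem.List.pyGetD result x 0 - PySem.List.pyGetD c a 0|]) acc0) []
    -- finalresult: for b in range(len(result0)): if result0[b] <= m: append
    let finalresult : List Int :=
      (PySem.List.pyRange 0 (result0.length : Int)).foldl (fun acc b =>
        if PySem.List.pyGetD result0 b 0 ≤ m then acc ++ [PySem.List.pyGetD result0 b 0] else acc) []
    match PySem.List.max? finalresult (fun y => y) with
    | some maxData => maxData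
    | none => 0      -- Python: max([]) raises ValueError; excluded by Pre_
  | _, _ => 0        -- Python: min([]) raises ValueError; excluded by Pre_

-- ===== PORT B =====
def flatLandSpace_alt (n : Int) (m : Int) (c : List Int) : Int :=
  match PySem.List.max? c (fun y => y) with
  | none => 0        -- Python: max([]) raises ValueError; excluded by Pre_
  | some mx =>
    match PySem.List.min? c (fun y => y) with
    | none => 0
    | some mn => min m (mx - mn)

-- ===== PRECONDITION & SPEC =====
-- Pre_ excludes exactly the inputs on which A raises ValueError: the empty city list
-- (min([]) raises) and m < 0 (no distance ≤ m, so max([]) raises).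
def Pre_flatLandSpace (n : Int) (m : Int) (c : List Int) : Prop := c ≠ [] ∧ 0 ≤ m
instance (n : Int) (m : Int) (c : List Int) : Decidable (Pre_flatLandSpace n m c) := by
  unfold Pre_flatLandSpace; infer_instance
def pvWitness_flatLandSpace : Int × Int × List Int := (3, 2, [1, 5, 4])

def Spec_flatLandSpace (n : Int) (m : Int) (c : List Int) (out : Int) : Prop := out = flatLandSpace_alt n m c
instance (n : Int) (m : Int) (c : List Int) (out : Int) : Decidable (Spec_flatLandSpace n m c out) := by unfold Spec_flatLandSpace; infer_instance

-- ===== CLAIM (what is proved, stated in full; the proofs are below) =====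
def Claim_equal_flatLandSpace : Prop := ∀ (n : Int) (m : Int) (c : List Int), Dom_flatLandSpace n m c → Pre_flatLandSpace n m c → Spec_flatLandSpace n m c (flatLandSpace n m c)

-- ===== LEMMAS AND PROOFS =====

-- Python max(l) = t when t is in l and bounds every element.
theorem pyMax_eq_of_mem_of_bound {l : List Int} {t : Int}
    (hmem : t ∈ l) (hub : ∀ y ∈ l, y ≤ t) :
    PySem.List.max? l (fun y => y) = some t := by
  cases hmx : PySem.List.max? l (fun y => y) with
  | none =>
    rw [PySem.List.max?_eq_none_iff] at hmx
    subst hmx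
    simp at hmem
  | some v =>
    have hvmem := PySem.List.max?_mem hmx
    have h1 : t ≤ v := PySem.List.max?_isMax hmx t hmem
    have h2 : v ≤ t := hub v hvmem
    rw [le_antisymm h2 h1]

-- ===== VERDICT (by name: the statement is the Claim_ definition above) =====
theorem flatLandSpace_spec : Claim_equal_flatLandSpace := by
  intro n m c _ hpre
  obtain ⟨hne, hm⟩ := hpre
  unfold Spec_flatLandSpace flatLandSpace flatLandSpace_alt
  cases hmin : PySem.List.min? c (fun y => y) with
  | none => rw [PySem.List.min?_eq_none_iff] at hmin; exact absurd hmin hne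
  | some mn =>
  cases hmax : PySem.List.max? c (fun y => y) with
  | none =>
    rw [PySem.List.max?_eq_none_iff] at hmax
  | some mx =>
  simp only
  have hmnmem : mn ∈ c := PySem.List.min?_mem hmin
  have hmxmem : mx ∈ c := PySem.List.max?_mem hmax
  have hmnmx : mn ≤ mx := PySem.List.max?_isMax hmax mn hmnmem
  -- normalize A's three loops
  rw [PySem.List.foldl_append_singleton_eq_self]
  simp only [List.nil_append]
  rw [PySem.List.foldl_pyRange_zero_pyGetD' c 0
      (fun acc0 a => (PySem.List.pyRange 0 ((PySem.List.pyRange mn (mx + 1)).length : Int)).foldl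
        (fun acc1 x => acc1 ++ [|PySem.List.pyGetD (PySem.List.pyRange mn (mx + 1)) x 0 - a|]) acc0) []]
  have hinner : ∀ (a : Int) (acc0 : List Int),
      (PySem.List.pyRange 0 ((PySem.List.pyRange mn (mx + 1)).length : Int)).foldl
        (fun acc1 x => acc1 ++ [|PySem.List.pyGetD (PySem.List.pyRange mn (mx + 1)) x 0 - a|]) acc0
      = acc0 ++ (PySem.List.pyRange mn (mx + 1)).map (fun x => |x - a|) := by
    intro a acc0
    rw [PySem.List.foldl_pyRange_zero_pyGetD' (PySem.List.pyRange mn (mx + 1)) 0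
        (fun acc1 x => acc1 ++ [|x - a|]) acc0]
    exact PySem.List.foldl_append_singleton_eq_map _ _ _
  simp only [hinner]
  rw [PySem.List.foldl_append_eq_flatMap]
  simp only [List.nil_append]
  set R0 : List Int := c.flatMap (fun a => (PySem.List.pyRange mn (mx + 1)).map (fun x => |x - a|)) with hR0
  rw [PySem.List.foldl_pyRange_zero_pyGetD' R0 0
      (fun acc b => if b ≤ m then acc ++ [b] else acc) []]
  rw [PySem.List.foldl_append_ite_eq_filter (fun b => b ≤ m)]
  simp only [List.nil_append]
  -- the target value
  set t : Int := min m (mx - mn) with ht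
  have h0t : 0 ≤ t := by omega
  have htspan : t ≤ mx - mn := by omega
  have htm : t ≤ m := by omega
  have hmemR0 : t ∈ R0 := by
    rw [hR0, List.mem_flatMap]
    refine ⟨mn, hmnmem, ?_⟩
    rw [List.mem_map]
    refine ⟨mn + t, ?_, ?_⟩
    · rw [PySem.List.mem_pyRange_one]
      omega
    · rw [show mn + t - mn = t by ring, abs_of_nonneg h0t]
  have hmemF : t ∈ R0.filter (fun b => decide (b ≤ m)) := by
    rw [List.mem_filter]
    exact ⟨hmemR0, by simpa using htm⟩
  have hub : ∀ y ∈ R0.filter (fun b => decide (b ≤ m)), y ≤ t := by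
    intro y hy
    rw [List.mem_filter] at hy
    obtain ⟨hyR0, hym⟩ := hy
    rw [hR0, List.mem_flatMap] at hyR0
    obtain ⟨a, hac, hy⟩ := hyR0
    rw [List.mem_map] at hy
    obtain ⟨x, hx, hxy⟩ := hy
    rw [PySem.List.mem_pyRange_one] at hx
    have hamn : mn ≤ a := PySem.List.min?_isMin hmin a hac
    have hamx : a ≤ mx := PySem.List.max?_isMax hmax a hac
    have hym' : y ≤ m := by simpa using hym
    have habs : |x - a| ≤ mx - mn := abs_le.mpr ⟨by omega, by omega⟩
    omega
  rw [pyMax_eq_of_mem_of_bound hmemF hub]
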